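-- pv_equiv track=rewrite | github.com/thisIsJooS/Algorithm-Problem-Solving | BOJ/20327.py | oper4
-- ===== SOURCE A (Python) =====
-- def oper4(arr, l):
--     n = len(arr)
--     s = 2**l
--     for x in range(0, n, s):
--         for y in range(0, n, s):
--             tmp = []
--             for i in range(s):
--                 row = []
--                 for j in range(s):
--                     row.append(arr[x+i][y+j])
--                 tmp.append(row)
--
--             tmp = rotateLeft(tmp)
--             for i in range(s):
--                 for j in range(s):
--                     arr[x+i][y+j] = tmp[i][j]
--     return arr
--
-- def rotateLeft(arr):
--     n, m = len(arr), len(arr[0])    # 행, 열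
--
--     result = [[0] * n for _ in range(m)]
--     for i in range(n):
--         for j in range(m):
--             result[m-1-j][i] = arr[i][j]
--
--     return result
-- ===== SOURCE B (Python) =====
-- # B: closed-form per-cell index mapping -- each output cell is read directly from the
-- # source block (counterclockwise rotation), with no tmp block, no rotateLeft helper
-- # and no cell-by-cell mutation loop.  NOTE: A mutates arr in place and returns it;
-- # B returns a fresh grid -- the equivalence claimed is about the return value only.
-- def oper4(arr, l):
--     n = len(arr)
--     s = 1 << l
--     return [[arr[r - r % s + c % s][c - c % s + s - 1 - r % s] for c in range(n)]
--             for r in range(n)]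
-- ===== Notes on version B (the rewrite author's own statement) =====
-- stated objective: simpler
-- what changed: Replaces A's four nested loops per block (copy block to tmp, rotateLeft helper building a zero-filled result, copy back into arr) with a single closed-form per-cell index mapping that builds the whole output grid in one comprehension; B does not mutate arr.
-- outside the precondition, e.g. on oper4([[1, 2], [3, 4, 5]], 0): A returns [[1, 2], [3, 4, 5]], B returns [[1, 2], [3, 4]]
import Mathlib
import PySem

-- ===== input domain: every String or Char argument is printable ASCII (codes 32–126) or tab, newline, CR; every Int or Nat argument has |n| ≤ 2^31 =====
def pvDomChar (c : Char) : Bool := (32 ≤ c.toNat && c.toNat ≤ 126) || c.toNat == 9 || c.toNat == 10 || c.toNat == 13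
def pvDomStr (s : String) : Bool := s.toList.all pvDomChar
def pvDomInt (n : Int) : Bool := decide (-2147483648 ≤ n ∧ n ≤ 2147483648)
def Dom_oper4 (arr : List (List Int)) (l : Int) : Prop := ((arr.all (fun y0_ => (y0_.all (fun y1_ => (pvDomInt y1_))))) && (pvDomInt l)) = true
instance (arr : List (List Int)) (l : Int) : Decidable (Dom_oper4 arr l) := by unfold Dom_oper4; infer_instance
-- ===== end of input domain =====

-- B replaces A's per-block copy/rotateLeft/copy-back loops by one closed-form per-cell
-- index mapping building a fresh grid (objective: simpler).  A mutates arr in place and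
-- returns it; B returns a new grid: the equivalence proved is about the return value only.

-- shared low-level grid access (Python arr[r][c] and arr[r][c] = v on the nonnegative,
-- in-range indices that occur under Pre_; exact there)
def cell (g : List (List Int)) (r c : Nat) : Int := (g.getD r []).getD c 0
def setCell (g : List (List Int)) (r c : Nat) (v : Int) : List (List Int) :=
  g.modify r (fun row => row.set c v)

-- ===== PORT A =====
def rotateLeftPort (t : List (List Int)) : List (List Int) :=
  let n := t.length
  let m := (t.headD []).length
  let result := (List.range m).map (fun _ => (List.range n).map (fun _ => (0 : Int)))
  (List.range n).foldl (fun res i =>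
    (List.range m).foldl (fun res j =>
      setCell res (m - 1 - j) i (cell t i j)) res) result

def oper4 (arr : List (List Int)) (l : Int) : List (List Int) :=
  let n := arr.length
  let s : Int := 2 ^ l.toNat   -- Python 2**l (an int exactly when 0 ≤ l, required by Pre_)
  (PySem.List.pyRange 0 n s).foldl (fun g x =>
    (PySem.List.pyRange 0 n s).foldl (fun g y =>
      let tmp := (List.range s.toNat).foldl (fun tmp (i : Nat) =>
        tmp ++ [(List.range s.toNat).foldl (fun row (j : Nat) =>
          row ++ [cell g (x + (i : Int)).toNat (y + (j : Int)).toNat]) []]) []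
      let tmp2 := rotateLeftPort tmp
      (List.range s.toNat).foldl (fun g (i : Nat) =>
        (List.range s.toNat).foldl (fun g (j : Nat) =>
          setCell g (x + (i : Int)).toNat (y + (j : Int)).toNat (cell tmp2 i j)) g) g) g) arr

-- ===== PORT B =====
def oper4_alt (arr : List (List Int)) (l : Int) : List (List Int) :=
  let n := arr.length
  let s : Nat := 2 ^ l.toNat   -- 1 << l
  (List.range n).map (fun r =>
    (List.range n).map (fun c =>
      cell arr (r - r % s + c % s) (c - c % s + s - 1 - r % s)))

-- ===== PRECONDITION & SPEC =====
-- Pre_: 0 ≤ l (2**l is not an int otherwise), the grid is square (A raises IndexError on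
-- short rows; on rows longer than n A rotates only the leading n×n part and leaves the
-- ragged tails of its in-place argument untouched — malformed input outside the problem's
-- square-grid domain, excluded here), and the block size 2^l divides n (otherwise the last
-- block runs off the grid and A raises IndexError).
def Pre_oper4 (arr : List (List Int)) (l : Int) : Prop :=
  0 ≤ l ∧ (∀ row ∈ arr, row.length = arr.length) ∧ 2 ^ l.toNat ∣ arr.length
instance (arr : List (List Int)) (l : Int) : Decidable (Pre_oper4 arr l) := by
  unfold Pre_oper4; infer_instance

def pvWitness_oper4 : List (List Int) × Int := ([[1, 2], [3, 4]], 1)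

def Spec_oper4 (arr : List (List Int)) (l : Int) (out : List (List Int)) : Prop := out = oper4_alt arr l
instance (arr : List (List Int)) (l : Int) (out : List (List Int)) : Decidable (Spec_oper4 arr l out) := by unfold Spec_oper4; infer_instance

-- ===== CLAIM (what is proved, stated in full; the proofs are below) =====
def Claim_equal_oper4 : Prop := ∀ (arr : List (List Int)) (l : Int), Dom_oper4 arr l → Pre_oper4 arr l → Spec_oper4 arr l (oper4 arr l)

-- ===== LEMMAS AND PROOFS =====


-- grid shape: square n×n, expressed through getD
def Sq (g : List (List Int)) (n : Nat) : Prop :=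
  g.length = n ∧ ∀ i < n, (g.getD i []).length = n

-- the closed-form cell mapping that B computes
def tgt (arr : List (List Int)) (s r c : Nat) : Int :=
  cell arr (r - r % s + c % s) (c - c % s + s - 1 - r % s)

theorem getD_modify {α : Type} (d : α) (g : List α) (r i : Nat) (f : α → α)
    (hi : i < g.length) :
    (g.modify r f).getD i d = if r = i then f (g.getD i d) else g.getD i d := by
  simp [List.getD_eq_getElem?_getD, List.getElem?_modify, List.getElem?_eq_getElem hi]

theorem getD_of_len_le {α : Type} (d : α) (g : List α) (i : Nat) (hi : g.length ≤ i) :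
    g.getD i d = d := by
  simp [List.getD_eq_getElem?_getD, List.getElem?_eq_none_iff.mpr hi]

theorem sq_setCell {g : List (List Int)} {n : Nat} (h : Sq g n) (r c : Nat) (v : Int) :
    Sq (setCell g r c v) n := by
  obtain ⟨h1, h2⟩ := h
  refine ⟨by simpa [setCell] using h1, ?_⟩
  intro i hi
  rw [setCell, getD_modify _ _ _ _ _ (by omega : i < g.length)]
  split_ifs with e
  · simpa using h2 i hi
  · exact h2 i hi

theorem getD_set {α : Type} (d : α) (l : List α) (i j : Nat) (v : α) :
    (l.set i v).getD j d = if i = j ∧ i < l.length then v else l.getD j d := by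
  rw [List.getD_eq_getElem?_getD, List.getElem?_set]
  by_cases h1 : i = j
  · subst h1
    by_cases h2 : i < l.length
    · simp [h2]
    · simp [h2, List.getD_eq_getElem?_getD]
  · simp [h1, List.getD_eq_getElem?_getD]

theorem cell_setCell {g : List (List Int)} {n : Nat} (h : Sq g n) {r c : Nat}
    (hr : r < n) (hc : c < n) (v : Int) (r' c' : Nat) :
    cell (setCell g r c v) r' c' = if r' = r ∧ c' = c then v else cell g r' c' := by
  obtain ⟨h1, h2⟩ := h
  unfold cell setCell
  by_cases hr' : r' < n
  · rw [getD_modify _ _ _ _ _ (by omega : r' < g.length)]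
    by_cases e : r = r'
    · subst e
      have hrow : (g.getD r []).length = n := h2 r hr'
      rw [if_pos rfl, getD_set]
      by_cases e1 : c = c'
      · subst e1
        rw [if_pos ⟨rfl, by omega⟩, if_pos ⟨rfl, rfl⟩]
      · rw [if_neg (fun h => e1 h.1), if_neg (fun h => e1 h.2.symm)]
    · have : ¬ (r' = r ∧ c' = c) := by tauto
      simp [e, this]
  · have hg : g.length ≤ r' := by omega
    have hg' : (g.modify r (fun row => row.set c v)).length ≤ r' := by
      simpa using hg
    rw [getD_of_len_le _ _ _ hg', getD_of_len_le _ _ _ hg]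
    have : ¬ (r' = r ∧ c' = c) := by omega
    simp [this]

-- a fold of setCell writes, characterised by a value function of the position
theorem writeL_spec (V : Nat → Nat → Int) :
    ∀ (L : List (Nat × Nat × Int)) (g : List (List Int)) {n : Nat},
      Sq g n → (∀ e ∈ L, e.1 < n ∧ e.2.1 < n ∧ e.2.2 = V e.1 e.2.1) →
      Sq (L.foldl (fun g e => setCell g e.1 e.2.1 e.2.2) g) n ∧
      ∀ r c, cell (L.foldl (fun g e => setCell g e.1 e.2.1 e.2.2) g) r c =
        if ∃ e ∈ L, e.1 = r ∧ e.2.1 = c then V r c else cell g r c := by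
  intro L
  induction L with
  | nil =>
    intro g n hSq _
    refine ⟨hSq, ?_⟩
    intro r c
    simp
  | cons e L ih =>
    intro g n hSq hL
    have he := hL e (List.mem_cons_self)
    have hstep : Sq (setCell g e.1 e.2.1 e.2.2) n := sq_setCell hSq _ _ _
    obtain ⟨ihSq, ihcell⟩ := ih (setCell g e.1 e.2.1 e.2.2) hstep
      (fun e' he' => hL e' (List.mem_cons_of_mem _ he'))
    refine ⟨by simpa using ihSq, ?_⟩
    intro r c
    have hmain := ihcell r c
    simp only [List.foldl_cons]
    rw [hmain, cell_setCell hSq he.1 he.2.1 e.2.2 r c]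
    by_cases h1 : ∃ e' ∈ L, e'.1 = r ∧ e'.2.1 = c
    · have hcons : ∃ e' ∈ e :: L, e'.1 = r ∧ e'.2.1 = c := by
        obtain ⟨e', he', hh⟩ := h1; exact ⟨e', List.mem_cons_of_mem _ he', hh⟩
      rw [if_pos h1, if_pos hcons]
    · rw [if_neg h1]
      by_cases h2 : r = e.1 ∧ c = e.2.1
      · have hcons : ∃ e' ∈ e :: L, e'.1 = r ∧ e'.2.1 = c :=
          ⟨e, List.mem_cons_self, h2.1.symm, h2.2.symm⟩
        rw [if_pos h2, if_pos hcons, he.2.2, h2.1, h2.2]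
      · have hcons : ¬ ∃ e' ∈ e :: L, e'.1 = r ∧ e'.2.1 = c := by
          rintro ⟨e', he', hh⟩
          rcases List.mem_cons.mp he' with rfl | hmem
          · exact h2 ⟨hh.1.symm, hh.2.symm⟩
          · exact h1 ⟨e', hmem, hh⟩
        rw [if_neg h2, if_neg hcons]

theorem div_eq_of_bounds {s q r : Nat} (h1 : q * s ≤ r) (h2 : r < q * s + s) : r / s = q :=
  Nat.div_eq_of_lt_le h1 (by rw [Nat.succ_mul]; omega)

theorem bounds_of_div_eq {s q r : Nat} (hs : 0 < s) (h : r / s = q) :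
    q * s ≤ r ∧ r < q * s + s := by
  subst h
  refine ⟨Nat.div_mul_le_self r s, ?_⟩
  have h1 := Nat.div_add_mod r s
  have h2 := Nat.mod_lt r hs
  have h3 : s * (r / s) = r / s * s := Nat.mul_comm _ _
  omega

theorem rot_spec (t : List (List Int)) (s : Nat) (_hs : 0 < s)
    (h1 : t.length = s) (h2 : (t.headD []).length = s) :
    Sq (rotateLeftPort t) s ∧
    ∀ a b, a < s → b < s → cell (rotateLeftPort t) a b = cell t b (s - 1 - a) := by
  have hres0 : Sq ((List.range s).map (fun _ => (List.range s).map (fun _ => (0 : Int)))) s := by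
    constructor
    · simp
    · intro i hi
      rw [PySem.List.getD_map_range _ _ _ _ hi]; simp
  have hrw : rotateLeftPort t =
      ((List.range s).flatMap (fun i => (List.range s).map (fun j => ((s - 1 - j : Nat), i, cell t i j)))).foldl
        (fun g e => setCell g e.1 e.2.1 e.2.2)
        ((List.range s).map (fun _ => (List.range s).map (fun _ => (0 : Int)))) := by
    rw [rotateLeftPort]
    simp only [h1, h2, List.foldl_flatMap, List.foldl_map]
  have hL : ∀ e ∈ (List.range s).flatMap (fun i => (List.range s).map
      (fun j => ((s - 1 - j : Nat), i, cell t i j))),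
      e.1 < s ∧ e.2.1 < s ∧ e.2.2 = cell t e.2.1 (s - 1 - e.1) := by
    intro e hee
    simp only [List.mem_flatMap, List.mem_map, List.mem_range] at hee
    obtain ⟨i, hi, j, hj, rfl⟩ := hee
    refine ⟨by omega, by omega, ?_⟩
    have hj' : s - 1 - (s - 1 - j) = j := by omega
    simp [hj']
  obtain ⟨hSq, hcell⟩ := writeL_spec (fun a b => cell t b (s - 1 - a)) _ _ hres0 hL
  rw [hrw]
  refine ⟨hSq, ?_⟩
  intro a b ha hb
  rw [hcell a b]
  have hex : ∃ e ∈ (List.range s).flatMap (fun i => (List.range s).map (fun j => ((s - 1 - j : Nat), i, cell t i j))),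
      e.1 = a ∧ e.2.1 = b := by
    refine ⟨((s - 1 - (s - 1 - a) : Nat), b, cell t b (s - 1 - a)), ?_, ⟨by omega, rfl⟩⟩
    simp only [List.mem_flatMap, List.mem_map, List.mem_range]
    refine ⟨b, hb, s - 1 - a, by omega, ?_⟩
    have haa : s - 1 - (s - 1 - a) = a := by omega
    rw [haa]
  rw [if_pos hex]

-- A's y-loop body over one block, in ℕ-indexed form
def blockBody (g : List (List Int)) (s x y : Nat) : List (List Int) :=
  let tmp := (List.range s).foldl (fun tmp i =>
    tmp ++ [(List.range s).foldl (fun row j => row ++ [cell g (x + i) (y + j)]) []]) []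
  let tmp2 := rotateLeftPort tmp
  (List.range s).foldl (fun g (i : Nat) =>
    (List.range s).foldl (fun g (j : Nat) => setCell g (x + i) (y + j) (cell tmp2 i j)) g) g

def natLoop (arr : List (List Int)) (s k : Nat) : List (List Int) :=
  (List.range k).foldl (fun g qx =>
    (List.range k).foldl (fun g qy => blockBody g s (qx * s) (qy * s)) g) arr

theorem block_spec (g : List (List Int)) (n s x y : Nat) (hs : 0 < s)
    (hSq : Sq g n) (hx : x + s ≤ n) (hy : y + s ≤ n) :
    Sq (blockBody g s x y) n ∧ ∀ r c, cell (blockBody g s x y) r c =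
      if x ≤ r ∧ r < x + s ∧ y ≤ c ∧ c < y + s then
        cell g (x + (c - y)) (y + (s - 1) - (r - x)) else cell g r c := by
  have htmp : ((List.range s).foldl (fun tmp i =>
      tmp ++ [(List.range s).foldl (fun row j => row ++ [cell g (x + i) (y + j)]) []]) []) =
      (List.range s).map (fun i => (List.range s).map (fun j => cell g (x + i) (y + j))) := by
    simp only [PySem.List.foldl_append_singleton_eq_map, List.nil_append]
  set tmp := (List.range s).map (fun i => (List.range s).map (fun j => cell g (x + i) (y + j))) with htmpdef
  have htl : tmp.length = s := by simp [htmpdef]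
  have hth : (tmp.headD []).length = s := by
    have : tmp.headD [] = tmp.getD 0 [] := by
      cases tmp with | nil => rfl | cons a t => rfl
    rw [this, htmpdef, PySem.List.getD_map_range _ _ _ _ hs]; simp
  have htcell : ∀ i j, i < s → j < s → cell tmp i j = cell g (x + i) (y + j) := by
    intro i j hi hj
    rw [htmpdef]
    unfold cell
    rw [PySem.List.getD_map_range _ _ _ _ hi, PySem.List.getD_map_range _ _ _ _ hj]
  obtain ⟨hrotSq, hrot⟩ := rot_spec tmp s hs htl hth
  have hrcell : ∀ i j, i < s → j < s →
      cell (rotateLeftPort tmp) i j = cell g (x + j) (y + (s - 1 - i)) := by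
    intro i j hi hj
    rw [hrot i j hi hj, htcell j (s - 1 - i) hj (by omega)]
  have hbody : blockBody g s x y =
      ((List.range s).flatMap (fun i => (List.range s).map
        (fun j => ((x + i : Nat), (y + j : Nat), cell (rotateLeftPort tmp) i j)))).foldl
        (fun g e => setCell g e.1 e.2.1 e.2.2) g := by
    rw [blockBody]
    simp only [htmp, List.foldl_flatMap, List.foldl_map]
  have hL : ∀ e ∈ (List.range s).flatMap (fun i => (List.range s).map
      (fun j => ((x + i : Nat), (y + j : Nat), cell (rotateLeftPort tmp) i j))),
      e.1 < n ∧ e.2.1 < n ∧ e.2.2 = cell g (x + (e.2.1 - y)) (y + (s - 1) - (e.1 - x)) := by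
    intro e hee
    simp only [List.mem_flatMap, List.mem_map, List.mem_range] at hee
    obtain ⟨i, hi, j, hj, rfl⟩ := hee
    refine ⟨?_, ?_, ?_⟩
    · show x + i < n; omega
    · show y + j < n; omega
    · show cell (rotateLeftPort tmp) i j = cell g (x + ((y + j) - y)) (y + (s - 1) - ((x + i) - x))
      rw [hrcell i j hi hj]
      have e3 : y + j - y = j := by omega
      have e4 : x + i - x = i := by omega
      rw [e3, e4]
      have e5 : y + (s - 1) - i = y + (s - 1 - i) := by omega
      rw [e5]
  obtain ⟨hSq', hcell'⟩ := writeL_spec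
    (fun r c => cell g (x + (c - y)) (y + (s - 1) - (r - x))) _ g hSq hL
  rw [hbody]
  refine ⟨hSq', ?_⟩
  intro r c
  rw [hcell' r c]
  by_cases hin : x ≤ r ∧ r < x + s ∧ y ≤ c ∧ c < y + s
  · have : ∃ e ∈ (List.range s).flatMap (fun i => (List.range s).map
        (fun j => ((x + i : Nat), (y + j : Nat), cell (rotateLeftPort tmp) i j))),
        e.1 = r ∧ e.2.1 = c := by
      refine ⟨((x + (r - x) : Nat), (y + (c - y) : Nat), cell (rotateLeftPort tmp) (r - x) (c - y)), ?_,
        ⟨by show x + (r - x) = r; omega, by show y + (c - y) = c; omega⟩⟩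
      simp only [List.mem_flatMap, List.mem_map, List.mem_range]
      exact ⟨r - x, by omega, c - y, by omega, rfl⟩
    rw [if_pos this, if_pos hin]
  · have : ¬ ∃ e ∈ (List.range s).flatMap (fun i => (List.range s).map
        (fun j => ((x + i : Nat), (y + j : Nat), cell (rotateLeftPort tmp) i j))),
        e.1 = r ∧ e.2.1 = c := by
      rintro ⟨e, hee, h1, h2⟩
      simp only [List.mem_flatMap, List.mem_map, List.mem_range] at hee
      obtain ⟨i, hi, j, hj, rfl⟩ := hee
      apply hin
      rw [← h1, ← h2]
      exact ⟨by show x ≤ x + i; omega, by show x + i < x + s; omega,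
        by show y ≤ y + j; omega, by show y + j < y + s; omega⟩
    rw [if_neg this, if_neg hin]

theorem loop_spec (arr : List (List Int)) (n s k : Nat) (hs : 0 < s) (hn : n = k * s) :
    ∀ (qs done : List (Nat × Nat)) (g : List (List Int)),
      Sq g n → qs.Nodup →
      (∀ p ∈ qs, p.1 < k ∧ p.2 < k) →
      (∀ p ∈ qs, p ∉ done) →
      (∀ r c, r < n → c < n →
        cell g r c = if (r / s, c / s) ∈ done then tgt arr s r c else cell arr r c) →
      Sq (qs.foldl (fun g q => blockBody g s (q.1 * s) (q.2 * s)) g) n ∧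
      ∀ r c, r < n → c < n →
        cell (qs.foldl (fun g q => blockBody g s (q.1 * s) (q.2 * s)) g) r c =
          if (r / s, c / s) ∈ done ++ qs then tgt arr s r c else cell arr r c := by
  intro qs
  induction qs with
  | nil =>
    intro done g hSq _ _ _ hinv
    simpa using ⟨hSq, fun r c hr hc => hinv r c hr hc⟩
  | cons q qs ih =>
    intro done g hSq hnd hbound hdis hinv
    obtain ⟨hq1, hq2⟩ := hbound q List.mem_cons_self
    have hxb : q.1 * s + s ≤ n := by
      have : (q.1 + 1) * s ≤ k * s := Nat.mul_le_mul_right s (by omega)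
      calc q.1 * s + s = (q.1 + 1) * s := by ring
        _ ≤ k * s := this
        _ = n := hn.symm
    have hyb : q.2 * s + s ≤ n := by
      have : (q.2 + 1) * s ≤ k * s := Nat.mul_le_mul_right s (by omega)
      calc q.2 * s + s = (q.2 + 1) * s := by ring
        _ ≤ k * s := this
        _ = n := hn.symm
    obtain ⟨hSq', hcell'⟩ := block_spec g n s (q.1 * s) (q.2 * s) hs hSq hxb hyb
    -- the new invariant, with done' = done ++ [q]
    have hinv' : ∀ r c, r < n → c < n →
        cell (blockBody g s (q.1 * s) (q.2 * s)) r c =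
          if (r / s, c / s) ∈ done ++ [q] then tgt arr s r c else cell arr r c := by
      intro r c hr hc
      have hdm1 := Nat.div_add_mod r s
      have hdm2 := Nat.div_add_mod c s
      have hm1 := Nat.mod_lt r hs
      have hm2 := Nat.mod_lt c hs
      rw [hcell' r c]
      by_cases hin : q.1 * s ≤ r ∧ r < q.1 * s + s ∧ q.2 * s ≤ c ∧ c < q.2 * s + s
      · have hds1 : r / s = q.1 := div_eq_of_bounds hin.1 hin.2.1
        have hds2 : c / s = q.2 := div_eq_of_bounds hin.2.2.1 hin.2.2.2
      -- the source cell of the rotation lies in the same (unprocessed) block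
        set r' : Nat := q.1 * s + (c - q.2 * s) with hr'def
        set c' : Nat := q.2 * s + (s - 1) - (r - q.1 * s) with hc'def
        have hr'b : q.1 * s ≤ r' ∧ r' < q.1 * s + s := by omega
        have hc'b : q.2 * s ≤ c' ∧ c' < q.2 * s + s := by omega
        have hdm1' := Nat.div_add_mod r' s
        have hdm2' := Nat.div_add_mod c' s
        have hm1' := Nat.mod_lt r' hs
        have hm2' := Nat.mod_lt c' hs
        have hds1' : r' / s = q.1 := div_eq_of_bounds hr'b.1 hr'b.2
        have hds2' : c' / s = q.2 := div_eq_of_bounds hc'b.1 hc'b.2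
        have hsrc : cell g r' c' = cell arr r' c' := by
          have hh := hinv r' c' (by omega) (by omega)
          rw [hds1', hds2'] at hh
          rwa [if_neg (hdis q List.mem_cons_self)] at hh
        have hmem : (r / s, c / s) ∈ done ++ [q] := by
          rw [hds1, hds2]; simp
        rw [hds1] at hdm1
        rw [hds2] at hdm2
        have hmc1 : s * q.1 = q.1 * s := Nat.mul_comm s q.1
        have hmc2 : s * q.2 = q.2 * s := Nat.mul_comm s q.2
        rw [if_pos hin, if_pos hmem, hsrc]
        unfold tgt
        have e1 : r' = r - r % s + c % s := by omega
        have e2 : c' = c - c % s + s - 1 - r % s := by omega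
        rw [e1, e2]
      · rw [if_neg hin]
        rw [hinv r c hr hc]
        have : ((r / s, c / s) ∈ done ++ [q]) ↔ ((r / s, c / s) ∈ done) := by
          simp only [List.mem_append, List.mem_singleton]
          constructor
          · rintro (h | h)
            · exact h
            · exfalso
              have h1 : r / s = q.1 := congrArg Prod.fst h
              have h2 : c / s = q.2 := congrArg Prod.snd h
              have b1 := bounds_of_div_eq hs h1
              have b2 := bounds_of_div_eq hs h2
              exact hin ⟨b1.1, b1.2, b2.1, b2.2⟩
          · intro h; exact Or.inl h
        rw [if_congr this rfl rfl]
    have hdis' : ∀ p ∈ qs, p ∉ done ++ [q] := by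
      intro p hp
      simp only [List.mem_append, List.mem_singleton]
      rintro (h | rfl)
      · exact hdis p (List.mem_cons_of_mem _ hp) h
      · exact (List.nodup_cons.mp hnd).1 hp
    obtain ⟨hS, hC⟩ := ih (done ++ [q]) (blockBody g s (q.1 * s) (q.2 * s)) hSq'
      (List.nodup_cons.mp hnd).2
      (fun p hp => hbound p (List.mem_cons_of_mem _ hp)) hdis' hinv'
    refine ⟨by simpa using hS, ?_⟩
    intro r c hr hc
    simp only [List.foldl_cons]
    rw [hC r c hr hc]
    have : ((r / s, c / s) ∈ (done ++ [q]) ++ qs) ↔ ((r / s, c / s) ∈ done ++ q :: qs) := by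
      simp [List.mem_append, List.mem_cons]
    rw [if_congr this rfl rfl]



theorem toNat_cast_add (a b : Nat) : (((a : Nat) : Int) + ((b : Nat) : Int)).toNat = a + b := by
  omega

theorem oper4_eq_natLoop (arr : List (List Int)) (l : Int)
    (hd : 2 ^ l.toNat ∣ arr.length) :
    oper4 arr l = natLoop arr (2 ^ l.toNat) (arr.length / 2 ^ l.toNat) := by
  set s := 2 ^ l.toNat with hsdef
  set n := arr.length with hndef
  set k := n / s with hkdef
  have hs : 0 < s := Nat.two_pow_pos _
  have hn : n = k * s := (Nat.div_mul_cancel hd).symm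
  have hcast : ((2 : Int) ^ l.toNat) = ((s : Nat) : Int) := by
    rw [hsdef]; push_cast; ring
  have hsInt : (0 : Int) < (s : Int) := by exact_mod_cast hs
  have hrange : PySem.List.pyRange 0 (n : Int) ((s : Nat) : Int) =
      (List.range k).map (fun q => ((q * s : Nat) : Int)) := by
    rw [PySem.List.pyRange_of_pos _ _ hsInt]
    have hcount : (if (0 : Int) < (n : Int) then ((((n : Int)) - 0 + (s : Int) - 1) / (s : Int)).toNat else 0) = k := by
      by_cases h0 : (0 : Int) < (n : Int)
      · rw [if_pos h0]
        have hnc : (n : Int) = (k : Int) * (s : Int) := by exact_mod_cast hn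
        have hmc : (k : Int) * (s : Int) = (s : Int) * (k : Int) := mul_comm _ _
        have he : ((n : Int)) - 0 + (s : Int) - 1 = ((s - 1 : Nat) : Int) + (s : Int) * (k : Int) := by
          omega
        rw [he, Int.add_mul_ediv_left _ _ (by omega : (s : Int) ≠ 0)]
        rw [Int.ediv_eq_zero_of_lt (Int.natCast_nonneg _)
          (by exact_mod_cast Nat.sub_lt hs Nat.one_pos)]
        simp
      · rw [if_neg h0]
        have hn0 : n = 0 := by omega
        have hk0 : k = 0 := by
          rw [hkdef, hn0]
          simp
        exact hk0.symm
    rw [hcount]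
    apply List.map_congr_left
    intro q hq
    push_cast
    ring
  simp only [oper4]
  rw [hcast, ← hndef]
  simp only [Int.toNat_natCast, hrange, List.foldl_map, toNat_cast_add]
  simp only [natLoop, blockBody]

-- ===== VERDICT (by name: the statement is the Claim_ definition above) =====
theorem oper4_spec : Claim_equal_oper4 := by
  intro arr l hDom hPre
  obtain ⟨h0, hrows, hdiv⟩ := hPre
  unfold Spec_oper4
  set s := 2 ^ l.toNat with hsdef
  set n := arr.length with hndef
  set k := n / s with hkdef
  have hs : 0 < s := Nat.two_pow_pos _
  have hn : n = k * s := (Nat.div_mul_cancel hdiv).symm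
  have hSq : Sq arr n := by
    refine ⟨rfl, ?_⟩
    intro i hi
    rw [List.getD_eq_getElem arr [] (by omega)]
    exact hrows _ (List.getElem_mem _)
  set qs := (List.range k).flatMap (fun qx => (List.range k).map (fun qy => (qx, qy))) with hqsdef
  have hflat : natLoop arr s k = qs.foldl (fun g q => blockBody g s (q.1 * s) (q.2 * s)) arr := by
    rw [hqsdef]
    rw [List.foldl_flatMap]
    simp only [List.foldl_map]
    rfl
  have hnd : qs.Nodup := by
    have : qs = (List.range k) ×ˢ (List.range k) := rfl
    rw [this]
    exact List.Nodup.product List.nodup_range List.nodup_range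
  have hbound : ∀ p ∈ qs, p.1 < k ∧ p.2 < k := by
    intro p hp
    rw [hqsdef] at hp
    simp only [List.mem_flatMap, List.mem_map, List.mem_range] at hp
    obtain ⟨a, ha, b, hb, rfl⟩ := hp
    exact ⟨ha, hb⟩
  obtain ⟨hSqOut, hOut⟩ := loop_spec arr n s k hs hn qs [] arr hSq hnd hbound
    (by intro p _ h; simp at h) (by intro r c _ _; simp)
  have hcells : ∀ r c, r < n → c < n →
      cell (qs.foldl (fun g q => blockBody g s (q.1 * s) (q.2 * s)) arr) r c = tgt arr s r c := by
    intro r c hr hc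
    rw [hOut r c hr hc]
    have hmem : (r / s, c / s) ∈ [] ++ qs := by
      rw [hqsdef]
      simp only [List.nil_append, List.mem_flatMap, List.mem_map, List.mem_range]
      refine ⟨r / s, ?_, c / s, ?_, rfl⟩
      · exact (Nat.div_lt_iff_lt_mul hs).mpr (by omega)
      · exact (Nat.div_lt_iff_lt_mul hs).mpr (by omega)
    rw [if_pos hmem]
  have halt : oper4_alt arr l =
      (List.range n).map (fun r => (List.range n).map (fun c => tgt arr s r c)) := rfl
  rw [oper4_eq_natLoop arr l hdiv, ← hsdef, ← hndef, ← hkdef, hflat, halt]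
  set out := qs.foldl (fun g q => blockBody g s (q.1 * s) (q.2 * s)) arr with houtdef
  apply List.ext_getElem
  · simp [hSqOut.1]
  · intro i h1 h2
    have hi : i < n := by
      have := hSqOut.1
      omega
    rw [List.getElem_map, List.getElem_range]
    apply List.ext_getElem
    · have := hSqOut.2 i hi
      rw [List.getD_eq_getElem out [] (by omega)] at this
      simp [this]
    · intro j h3 h4
      have hj : j < n := by
        have := hSqOut.2 i hi
        rw [List.getD_eq_getElem out [] (by omega)] at this
        omega
      rw [List.getElem_map, List.getElem_range]
      have := hcells i j hi hj
      unfold cell at this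
      rw [List.getD_eq_getElem out [] (by omega),
        List.getD_eq_getElem _ 0 (by omega)] at this
      exact this
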